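-- pv_equiv track=rewrite | github.com/b-lukaszuk/python_luzne_zadanka | book1/ch03/task1/main.py | calculate_total_price_usd
-- ===== SOURCE A (Python) =====
-- from typing import List
--
-- def calculate_total_price_usd(guest_ages: List[int]) -> int:
--     sum_usd: int = 0
--     for age in guest_ages:
--         if age < 3:
--             sum_usd += 0
--         elif age >= 3 and age <= 12:
--             sum_usd += 14
--         elif age >= 65:
--             sum_usd += 18
--         else:
--             sum_usd += 23
--     return sum_usd
-- ===== SOURCE B (Python) =====
-- def calculate_total_price_usd(guest_ages):
--     # Aggregate counting: total = 14*#(age>=3) + 9*#(age>=13) - 5*#(age>=65),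
--     # since each bracket price is a telescoping sum of threshold increments.
--     c3 = sum(1 for age in guest_ages if age >= 3)
--     c13 = sum(1 for age in guest_ages if age >= 13)
--     c65 = sum(1 for age in guest_ages if age >= 65)
--     return 14 * c3 + 9 * c13 - 5 * c65
-- ===== Notes on version B (the rewrite author's own statement) =====
-- stated objective: alternative
-- what changed: Instead of pricing each guest through a branch chain and accumulating, B counts how many ages clear each threshold (3, 13, 65) in three filter passes and combines the counts with the closed formula 14*c3 + 9*c13 - 5*c65.
import Mathlib
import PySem

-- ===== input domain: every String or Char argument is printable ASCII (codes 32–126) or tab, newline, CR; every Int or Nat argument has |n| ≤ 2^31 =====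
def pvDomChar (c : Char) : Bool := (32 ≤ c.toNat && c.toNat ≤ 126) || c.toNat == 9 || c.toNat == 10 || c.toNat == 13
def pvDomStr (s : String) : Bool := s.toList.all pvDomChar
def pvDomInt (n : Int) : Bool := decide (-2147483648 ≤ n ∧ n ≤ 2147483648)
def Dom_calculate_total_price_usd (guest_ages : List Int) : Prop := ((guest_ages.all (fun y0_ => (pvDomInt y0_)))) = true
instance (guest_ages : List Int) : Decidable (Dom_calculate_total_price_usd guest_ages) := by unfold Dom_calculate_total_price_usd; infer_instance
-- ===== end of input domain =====

-- B replaces the per-guest branch-chain accumulation by three threshold counts combined arithmetically (alternative; same cost).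
-- ===== PORT A =====
def calculate_total_price_usd (guest_ages : List Int) : Int :=
  guest_ages.foldl (fun sum_usd age =>
    if age < 3 then sum_usd + 0
    else if age ≥ 3 ∧ age ≤ 12 then sum_usd + 14
    else if age ≥ 65 then sum_usd + 18
    else sum_usd + 23) 0

-- ===== PORT B =====
-- sum(1 for age in guest_ages if age >= t) ported as a filtered count
def pvCountGE (guest_ages : List Int) (t : Int) : Int :=
  ((guest_ages.filter (fun age => age ≥ t)).map (fun _ => (1 : Int))).sum
def calculate_total_price_usd_alt (guest_ages : List Int) : Int :=
  14 * pvCountGE guest_ages 3 + 9 * pvCountGE guest_ages 13 - 5 * pvCountGE guest_ages 65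

-- ===== PRECONDITION & SPEC =====
def Spec_calculate_total_price_usd (guest_ages : List Int) (out : Int) : Prop := out = calculate_total_price_usd_alt guest_ages
instance (guest_ages : List Int) (out : Int) : Decidable (Spec_calculate_total_price_usd guest_ages out) := by unfold Spec_calculate_total_price_usd; infer_instance

-- ===== CLAIM (what is proved, stated in full; the proofs are below) =====
def Claim_equal_calculate_total_price_usd : Prop := ∀ (guest_ages : List Int), Dom_calculate_total_price_usd guest_ages → Spec_calculate_total_price_usd guest_ages (calculate_total_price_usd guest_ages)

-- ===== LEMMAS AND PROOFS =====
theorem pvCountGE_cons (a : Int) (l : List Int) (t : Int) :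
    pvCountGE (a :: l) t = (if a ≥ t then 1 else 0) + pvCountGE l t := by
  unfold pvCountGE
  by_cases h : a ≥ t <;> simp [List.filter_cons, h]

theorem pv_shift (l : List Int) (s : Int) :
    l.foldl (fun sum_usd age =>
      if age < 3 then sum_usd + 0
      else if age ≥ 3 ∧ age ≤ 12 then sum_usd + 14
      else if age ≥ 65 then sum_usd + 18
      else sum_usd + 23) s
    = s + (14 * pvCountGE l 3 + 9 * pvCountGE l 13 - 5 * pvCountGE l 65) := by
  induction l generalizing s with
  | nil => simp [pvCountGE]
  | cons a u ih =>
      simp only [List.foldl_cons]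
      rw [ih, pvCountGE_cons, pvCountGE_cons, pvCountGE_cons]
      split_ifs <;> omega

-- ===== VERDICT (by name: the statement is the Claim_ definition above) =====
theorem calculate_total_price_usd_spec : Claim_equal_calculate_total_price_usd := by
  intro gs _
  unfold Spec_calculate_total_price_usd calculate_total_price_usd calculate_total_price_usd_alt
  rw [pv_shift]
  ring
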